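-- pv_equiv track=rewrite | github.com/Kabir0067/Exness | StrategiesBtc/_btc_risk/logging_.py | _ordered_fieldnames
-- ===== SOURCE A (Python) =====
-- from typing import Dict, List, Optional, Tuple
--
-- def _ordered_fieldnames(keys: List[str]) -> List[str]:
--     preferred = [
--         "order_id",
--         "timestamp",
--         "side",
--         "enqueue_time",
--         "send_time",
--         "fill_time",
--         "expected_price",
--         "filled_price",
--         "slippage",
--         "slippage_points",
--         "latency_enqueue_to_send_ms",
--         "latency_send_to_fill_ms",
--         "total_latency_ms",
--         "reason",
--     ]
--     out: List[str] = []
--     s = set(keys)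
--     for k in preferred:
--         if k in s:
--             out.append(k)
--     for k in keys:
--         if k not in set(out):
--             out.append(k)
--     return out
-- ===== SOURCE B (Python) =====
-- from typing import List
--
-- def _ordered_fieldnames(keys: List[str]) -> List[str]:
--     preferred = [
--         "order_id",
--         "timestamp",
--         "side",
--         "enqueue_time",
--         "send_time",
--         "fill_time",
--         "expected_price",
--         "filled_price",
--         "slippage",
--         "slippage_points",
--         "latency_enqueue_to_send_ms",
--         "latency_send_to_fill_ms",
--         "total_latency_ms",
--         "reason",
--     ]
--     rank = {k: i for i, k in enumerate(preferred)}
--     dedup = list(dict.fromkeys(keys))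
--     return sorted(dedup, key=lambda k: rank.get(k, len(preferred)))
-- ===== Notes on version B (the rewrite author's own statement) =====
-- stated objective: faster
-- what changed: Replaces A's two filtered scans (which rebuild set(out) for every key) with one ordered dedup via dict.fromkeys followed by a single stable sort keyed on a precomputed rank dict (preferred index, else len(preferred)).
import Mathlib
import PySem

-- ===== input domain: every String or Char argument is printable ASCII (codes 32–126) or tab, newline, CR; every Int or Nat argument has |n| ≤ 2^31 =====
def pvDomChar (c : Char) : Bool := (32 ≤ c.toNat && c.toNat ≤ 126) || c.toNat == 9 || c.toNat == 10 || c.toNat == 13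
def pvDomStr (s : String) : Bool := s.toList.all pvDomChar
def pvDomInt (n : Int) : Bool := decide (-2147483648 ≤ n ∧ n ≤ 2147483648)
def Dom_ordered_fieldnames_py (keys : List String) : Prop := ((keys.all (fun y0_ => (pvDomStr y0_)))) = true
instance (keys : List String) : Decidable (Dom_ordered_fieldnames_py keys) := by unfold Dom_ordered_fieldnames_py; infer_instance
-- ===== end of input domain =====

-- B replaces A's two filtered scans (which rebuild set(out) per key) by one ordered dedup
-- plus a single stable sort on a precomputed preferred-rank dict (objective: faster, measured).

-- ===== PORT A =====
def ordered_fieldnames_py (keys : List String) : List String :=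
  let preferred : List String := ["order_id","timestamp","side","enqueue_time","send_time","fill_time","expected_price","filled_price","slippage","slippage_points","latency_enqueue_to_send_ms","latency_send_to_fill_ms","total_latency_ms","reason"]
  let s : PySem.Set String := PySem.Set.ofList keys
  let out : List String :=
    preferred.foldl (fun out k => if PySem.Set.contains s k then out ++ [k] else out) []
  keys.foldl
    (fun out k => if PySem.Set.contains (PySem.Set.ofList out) k then out else out ++ [k]) out

-- ===== PORT B =====
def ordered_fieldnames_py_alt (keys : List String) : List String :=
  let preferred : List String := ["order_id","timestamp","side","enqueue_time","send_time","fill_time","expected_price","filled_price","slippage","slippage_points","latency_enqueue_to_send_ms","latency_send_to_fill_ms","total_latency_ms","reason"]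
  let rank : PySem.Dict String Int :=
    (PySem.List.enumerate preferred).foldl (fun d p => PySem.Dict.insert d p.2 p.1)
      PySem.Dict.empty
  let dedup : List String := PySem.List.dedup keys
  PySem.List.sorted dedup (fun k => PySem.Dict.getD rank k (PySem.List.len preferred)) false

-- ===== PRECONDITION & SPEC =====
def Spec_ordered_fieldnames_py (keys : List String) (out : List String) : Prop := out = ordered_fieldnames_py_alt keys
instance (keys : List String) (out : List String) : Decidable (Spec_ordered_fieldnames_py keys out) := by unfold Spec_ordered_fieldnames_py; infer_instance

-- ===== CLAIM (what is proved, stated in full; the proofs are below) =====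
def Claim_equal_ordered_fieldnames_py : Prop := ∀ (keys : List String), Dom_ordered_fieldnames_py keys → Spec_ordered_fieldnames_py keys (ordered_fieldnames_py keys)

-- ===== LEMMAS AND PROOFS =====

/-- The preferred-field list (proof-side name for the literal both ports contain). -/
def pvPref : List String := ["order_id","timestamp","side","enqueue_time","send_time","fill_time","expected_price","filled_price","slippage","slippage_points","latency_enqueue_to_send_ms","latency_send_to_fill_ms","total_latency_ms","reason"]

/-- B's rank dictionary, as built by B's dict comprehension. -/
def pvRankD : PySem.Dict String Int :=
  (PySem.List.enumerate pvPref).foldl (fun d p => PySem.Dict.insert d p.2 p.1) PySem.Dict.empty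

/-- B's sort key: rank.get(k, 14). -/
def pvKey (k : String) : Int := PySem.Dict.getD pvRankD k (PySem.List.len pvPref)

lemma pvRankD_lit : pvRankD = ⟨[("order_id",0),("timestamp",1),("side",2),("enqueue_time",3),("send_time",4),("fill_time",5),("expected_price",6),("filled_price",7),("slippage",8),("slippage_points",9),("latency_enqueue_to_send_ms",10),("latency_send_to_fill_ms",11),("total_latency_ms",12),("reason",13)]⟩ := by rfl

lemma alt_eq (keys : List String) :
    ordered_fieldnames_py_alt keys = PySem.List.sorted (PySem.Set.ofList keys) pvKey false := by
  rw [ordered_fieldnames_py_alt, PySem.List.dedup_eq_ofList]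
  rfl

lemma pvKey_of_not_mem (k : String) (h : k ∉ pvPref) : pvKey k = 14 := by
  simp only [pvPref, List.mem_cons, not_or] at h
  obtain ⟨h1,h2,h3,h4,h5,h6,h7,h8,h9,h10,h11,h12,h13,h14,-⟩ := h
  have b1 : ("order_id" == k) = false := by simp [Ne.symm h1]
  have b2 : ("timestamp" == k) = false := by simp [Ne.symm h2]
  have b3 : ("side" == k) = false := by simp [Ne.symm h3]
  have b4 : ("enqueue_time" == k) = false := by simp [Ne.symm h4]
  have b5 : ("send_time" == k) = false := by simp [Ne.symm h5]
  have b6 : ("fill_time" == k) = false := by simp [Ne.symm h6]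
  have b7 : ("expected_price" == k) = false := by simp [Ne.symm h7]
  have b8 : ("filled_price" == k) = false := by simp [Ne.symm h8]
  have b9 : ("slippage" == k) = false := by simp [Ne.symm h9]
  have b10 : ("slippage_points" == k) = false := by simp [Ne.symm h10]
  have b11 : ("latency_enqueue_to_send_ms" == k) = false := by simp [Ne.symm h11]
  have b12 : ("latency_send_to_fill_ms" == k) = false := by simp [Ne.symm h12]
  have b13 : ("total_latency_ms" == k) = false := by simp [Ne.symm h13]
  have b14 : ("reason" == k) = false := by simp [Ne.symm h14]
  simp [pvKey, pvRankD_lit, PySem.Dict.getD, PySem.Dict.get?, List.find?, PySem.List.len, pvPref,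
    b1, b2, b3, b4, b5, b6, b7, b8, b9, b10, b11, b12, b13, b14]

lemma pvKey_lt_of_mem (k : String) (h : k ∈ pvPref) : pvKey k < 14 := by
  fin_cases h <;> decide

lemma pvKey_bounds (k : String) : 0 ≤ pvKey k ∧ pvKey k < 15 := by
  by_cases h : k ∈ pvPref
  · fin_cases h <;> decide
  · rw [pvKey_of_not_mem k h]; exact ⟨by norm_num, by norm_num⟩

lemma pvKey_inj_on (k y : String) (hk : k ∈ pvPref) : pvKey y = pvKey k ↔ y = k := by
  constructor
  · intro h
    by_cases hy : y ∈ pvPref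
    · fin_cases hk <;> fin_cases hy <;> first | rfl | (exfalso; revert h; decide)
    · exfalso; rw [pvKey_of_not_mem y hy] at h
      exact absurd h.symm (ne_of_lt (pvKey_lt_of_mem k hk))
  · rintro rfl; rfl

/-- Stable insertion of `x` between a prefix of keys `≤ key x` and a suffix of keys `> key x`. -/
lemma insert_mid (key : String → Int) (x : String) (u v : List String)
    (hu : ∀ y ∈ u, key y ≤ key x) (hv : ∀ y ∈ v, key x < key y) :
    PySem.List.insertBy (fun a b => decide (key a < key b)) x (u ++ v) = u ++ x :: v := by
  induction u with
  | nil =>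
    cases v with
    | nil => rfl
    | cons y ys => simp [PySem.List.insertBy, hv y (by simp)]
  | cons a u ih =>
    have ha : ¬ (key x < key a) := not_lt.mpr (hu a (by simp))
    simp only [List.cons_append, PySem.List.insertBy, ha, decide_false, Bool.false_eq_true,
      if_false, List.cons.injEq, true_and]
    exact ih (fun y hy => hu y (by simp [hy])) 

/-- Bucket form of a bounded-key list: all keys of value i, in order, for i = 0 … N-1. -/
def pvBuckets (key : String → Int) (N : Nat) (xs : List String) : List String :=
  (List.range N).flatMap (fun (i : Nat) => xs.filter (fun y => key y == (i : Int)))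

lemma buckets_insert (key : String → Int) (N : Nat) (xs : List String) (x : String)
    (hx : 0 ≤ key x ∧ key x < N) :
    PySem.List.insertBy (fun a b => decide (key a < key b)) x (pvBuckets key N xs)
      = pvBuckets key N (xs ++ [x]) := by
  set r : Nat := (key x).toNat with hr
  have hkx : key x = (r : Int) := by omega
  obtain ⟨m, hm⟩ : ∃ m, N = (r + 1) + m := ⟨N - (r+1), by omega⟩
  have hsplit : ∀ ys : List String, pvBuckets key N ys =
      (List.range r).flatMap (fun (i : Nat) => ys.filter (fun y => key y == (i : Int)))
      ++ ys.filter (fun y => key y == (r : Int))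
      ++ ((List.range m).map (r + 1 + ·)).flatMap (fun (i : Nat) => ys.filter (fun y => key y == (i : Int))) := by
    intro ys
    rw [pvBuckets, hm, List.range_add, List.flatMap_append, List.range_succ, List.flatMap_append]
    first
    | rfl
    | ac_rfl
    | simp [List.append_assoc]
  have hfx : ∀ (i : Nat), i ≠ r → ([x].filter (fun y => key y == (i : Int))) = [] := by
    intro i hi
    have : (key x == (i : Int)) = false := by
      rw [hkx]; simp; omega
    simp [List.filter, this]
  have happ : ∀ (i : Nat), (xs ++ [x]).filter (fun y => key y == (i : Int))
      = xs.filter (fun y => key y == (i : Int)) ++ [x].filter (fun y => key y == (i : Int)) := by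
    intro i; rw [List.filter_append]
  rw [hsplit xs, hsplit (xs ++ [x])]
  have h1 : (List.range r).flatMap (fun (i : Nat) => (xs ++ [x]).filter (fun y => key y == (i : Int)))
      = (List.range r).flatMap (fun (i : Nat) => xs.filter (fun y => key y == (i : Int))) := by
    apply List.flatMap_congr
    intro i hi
    rw [happ i, hfx i (by simp at hi; omega), List.append_nil]
  have h2 : ((List.range m).map (r + 1 + ·)).flatMap (fun (i : Nat) => (xs ++ [x]).filter (fun y => key y == (i : Int)))
      = ((List.range m).map (r + 1 + ·)).flatMap (fun (i : Nat) => xs.filter (fun y => key y == (i : Int))) := by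
    apply List.flatMap_congr
    intro i hi
    have : i ≠ r := by
      simp only [List.mem_map, List.mem_range] at hi; omega
    rw [happ i, hfx i this, List.append_nil]
  have h3 : (xs ++ [x]).filter (fun y => key y == (r : Int))
      = xs.filter (fun y => key y == (r : Int)) ++ [x] := by
    rw [happ r]
    congr 1
    simp [List.filter, hkx]
  rw [h1, h2, h3]
  rw [show (List.range r).flatMap (fun (i : Nat) => xs.filter (fun y => key y == (i : Int)))
        ++ (xs.filter (fun y => key y == (r : Int)) ++ [x])
        ++ ((List.range m).map (r + 1 + ·)).flatMap (fun (i : Nat) => xs.filter (fun y => key y == (i : Int)))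
      = ((List.range r).flatMap (fun (i : Nat) => xs.filter (fun y => key y == (i : Int)))
        ++ xs.filter (fun y => key y == (r : Int)))
        ++ x :: ((List.range m).map (r + 1 + ·)).flatMap (fun (i : Nat) => xs.filter (fun y => key y == (i : Int)))
      from by simp]
  apply insert_mid
  · intro y hy
    rcases List.mem_append.mp hy with h | h
    · obtain ⟨i, hi, hyf⟩ := List.mem_flatMap.mp h
      have := List.of_mem_filter hyf
      simp only [beq_iff_eq] at this
      simp only [List.mem_range] at hi
      omega
    · have := List.of_mem_filter h
      simp only [beq_iff_eq] at this
      omega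
  · intro y hy
    obtain ⟨i, hi, hyf⟩ := List.mem_flatMap.mp hy
    have := List.of_mem_filter hyf
    simp only [beq_iff_eq] at this
    simp only [List.mem_map, List.mem_range] at hi
    omega

lemma sorted_eq_buckets (key : String → Int) (N : Nat) (xs : List String)
    (hb : ∀ x ∈ xs, 0 ≤ key x ∧ key x < N) :
    PySem.List.sorted xs key false = pvBuckets key N xs := by
  induction xs using List.reverseRecOn with
  | nil => simp [PySem.List.sorted, pvBuckets]
  | append_singleton xs x ih =>
    have hxs : ∀ y ∈ xs, 0 ≤ key y ∧ key y < N := fun y hy => hb y (by simp [hy])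
    rw [PySem.List.sorted_eq_foldl_insertBy, List.foldl_append]
    simp only [List.foldl_cons, List.foldl_nil]
    rw [← PySem.List.sorted_eq_foldl_insertBy, ih hxs]
    exact buckets_insert key N xs x (hb x (by simp))

/-- A's second loop, from any accumulator: append the not-yet-seen keys, first occurrences only. -/
lemma update_eq (ks : List String) : ∀ acc : List String,
    ks.foldl PySem.Set.add acc
      = acc ++ (ks.foldl PySem.Set.add []).filter (fun k => !(acc.contains k)) := by
  induction ks with
  | nil => intro acc; simp
  | cons k ks ih =>
    intro acc
    simp only [List.foldl_cons]
    rw [ih (PySem.Set.add acc k), ih (PySem.Set.add [] k)]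
    show PySem.Set.add acc k ++ _ = acc ++ (List.filter _ (PySem.Set.add [] k ++ _))
    have hadd0 : PySem.Set.add ([] : List String) k = [k] := by rfl
    rw [hadd0, List.filter_append]
    by_cases hk : k ∈ acc
    · have hc : PySem.Set.add acc k = acc := by
        simp [PySem.Set.add, PySem.Set.contains, hk]
      rw [hc]
      have hk1 : List.filter (fun k' => !(acc.contains k')) [k] = [] := by
        simp [List.filter, hk]
      rw [hk1, List.nil_append, List.filter_filter]
      congr 1
      apply List.filter_congr
      intro y _
      by_cases hyk : y = k
      · subst hyk; simp [hk]
      · simp [hyk]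
    · have hc : PySem.Set.add acc k = acc ++ [k] := by
        simp [PySem.Set.add, PySem.Set.contains, hk]
      rw [hc]
      have hk1 : List.filter (fun k' => !(acc.contains k')) [k] = [k] := by
        simp [List.filter, hk]
      rw [hk1, List.filter_filter, List.append_assoc]
      congr 2
      apply List.filter_congr
      intro y _
      by_cases hyk : y = k
      · subst hyk; simp [hk]
      · simp [hyk, Bool.and_comm]

lemma flatMap_if_eq_filter (l : List String) (q : String → Bool) :
    l.flatMap (fun x => if q x then [x] else []) = l.filter q := by
  induction l with
  | nil => rfl
  | cons a l ih =>
    by_cases h : q a <;> simp [List.flatMap_cons, h, ih]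

lemma range14_eq : List.range 14 = pvPref.map (fun k => (pvKey k).toNat) := by decide

lemma filter_nodup_eq (dd : List String) (hnd : dd.Nodup) (p : String) :
    dd.filter (fun y => y == p) = if dd.contains p then [p] else [] := by
  rw [List.filter_beq]
  by_cases h : p ∈ dd
  · rw [List.count_eq_one_of_mem hnd h]
    simp [h]
  · rw [List.count_eq_zero_of_not_mem h]
    simp [h]

-- ===== VERDICT (by name: the statement is the Claim_ definition above) =====
theorem ordered_fieldnames_py_spec : Claim_equal_ordered_fieldnames_py := by
  intro keys _
  unfold Spec_ordered_fieldnames_py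
  rw [alt_eq]
  set dd : List String := PySem.Set.ofList keys with hdd
  have hnd : dd.Nodup := PySem.Set.nodup_ofList keys
  set P : List String := pvPref.filter (fun k => PySem.Set.contains dd k) with hP
  -- A's value: the preferred keys that occur, then the remaining keys, first occurrences only
  have hA : ordered_fieldnames_py keys = P ++ dd.filter (fun k => !(P.contains k)) := by
    rw [ordered_fieldnames_py]
    show keys.foldl _ (["order_id","timestamp","side","enqueue_time","send_time","fill_time","expected_price","filled_price","slippage","slippage_points","latency_enqueue_to_send_ms","latency_send_to_fill_ms","total_latency_ms","reason"].foldl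
      (fun out k => if PySem.Set.contains (PySem.Set.ofList keys) k then out ++ [k] else out) []) = _
    rw [show (["order_id","timestamp","side","enqueue_time","send_time","fill_time","expected_price","filled_price","slippage","slippage_points","latency_enqueue_to_send_ms","latency_send_to_fill_ms","total_latency_ms","reason"] : List String) = pvPref from rfl]
    rw [PySem.List.foldl_append_if_eq_filter (fun k => PySem.Set.contains (PySem.Set.ofList keys) k) pvPref []]
    rw [List.nil_append, ← hdd, ← hP]
    rw [PySem.List.foldl_congr_mem keys _ PySem.Set.add P
      (by
        intro acc x _
        show (if PySem.Set.contains (PySem.Set.ofList acc) x then acc else acc ++ [x]) = _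
        have hc : PySem.Set.contains (PySem.Set.ofList acc) x = PySem.Set.contains acc x := by
          by_cases h : x ∈ acc <;> simp [PySem.Set.contains, PySem.Set.mem_ofList, h]
        rw [hc]; rfl)]
    rw [update_eq keys P]
    rfl
  -- B's value: the rank buckets 0 … 14 in order
  have hB : PySem.List.sorted dd pvKey false = pvBuckets pvKey 15 dd :=
    sorted_eq_buckets pvKey 15 dd (fun x _ => pvKey_bounds x)
  rw [hA, hB]
  have hsplit : pvBuckets pvKey 15 dd =
      (List.range 14).flatMap (fun (i : Nat) => dd.filter (fun y => pvKey y == (i : Int)))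
        ++ dd.filter (fun y => pvKey y == (14 : Int)) := by
    rw [pvBuckets, show List.range 15 = List.range 14 ++ [14] from rfl, List.flatMap_append]
    simp
  rw [hsplit]
  congr 1
  -- heads agree
  · rw [range14_eq, List.flatMap_map]
    have hcg : ∀ p ∈ pvPref,
        dd.filter (fun y => pvKey y == (((pvKey p).toNat : Nat) : Int))
          = if dd.contains p then [p] else [] := by
      intro p hp
      have hcast : (((pvKey p).toNat : Nat) : Int) = pvKey p := by
        have := (pvKey_bounds p).1; omega
      rw [← filter_nodup_eq dd hnd p]
      apply List.filter_congr
      intro y _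
      rw [hcast]
      by_cases hyp : y = p
      · subst hyp; simp
      · have : ¬ (pvKey y = pvKey p) := fun h => hyp ((pvKey_inj_on p y hp).mp h)
        simp [hyp, this]
    rw [List.flatMap_congr hcg, flatMap_if_eq_filter, hP]
    apply List.filter_congr
    intro p _
    rfl
  -- tails agree
  · apply List.filter_congr
    intro y hy
    have hydd : dd.contains y = true := List.elem_eq_true_of_mem hy
    by_cases hyp : y ∈ pvPref
    · have h1 : ¬ (pvKey y = (14 : Int)) := ne_of_lt (pvKey_lt_of_mem y hyp)
      have h2 : y ∈ P := by
        rw [hP, List.mem_filter]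
        exact ⟨hyp, by simpa [PySem.Set.contains] using hydd⟩
      simp [h1, h2]
    · have h1 : pvKey y = 14 := pvKey_of_not_mem y hyp
      have h2 : y ∉ P := by
        rw [hP, List.mem_filter]
        rintro ⟨hmem, -⟩
        exact hyp hmem
      simp [h1, h2]
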